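-- pv_equiv track=rewrite | github.com/rags/playground | py/problems/datachallenge/one_hop_mapper.py | link_combinations
-- ===== SOURCE A (Python) =====
-- def combs(links, n=None):
--     n = n or len(links)
--     for i in range(1, n):
--         links[0], links[i] = links[i], links[0]
--         yield '\t'.join(links)
--
-- def link_combinations(network):
--     for line in map(str.strip, network):
--         yield line
--         links = line.split('\t')
--         if '#' not in links: #no network beyond immediate friends
--             yield from combs(links)
--             #for comb in combs(links): yield comb #py 2.7
--         else:
--             n = links.index('#')
--             links.remove('#')
--             for comb in combs(links, n):
--                 yield comb.replace('\t', '\t#\t', 1)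
-- ===== SOURCE B (Python) =====
-- def link_combinations(network):
--     # Non-mutating re-implementation: each yielded permutation is built directly
--     # by slicing (rotate element i to the front) instead of cumulative in-place swaps.
--     for raw in network:
--         line = raw.strip()
--         yield line
--         links = line.split('\t')
--         if '#' in links:
--             k = links.index('#')
--             rest = links[:k] + links[k + 1:]
--             m = k if k else len(rest)
--             for i in range(1, m):
--                 rot = [rest[i]] + rest[:i] + rest[i + 1:]
--                 yield '\t'.join(rot).replace('\t', '\t#\t', 1)
--         else:
--             for i in range(1, len(links)):
--                 yield '\t'.join([links[i]] + links[:i] + links[i + 1:])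
-- ===== Notes on version B (the rewrite author's own statement) =====
-- stated objective: simpler
-- what changed: B drops the mutating swap generator: instead of cumulatively swapping links[0] with links[i] in place, each permutation is built directly by slicing ([links[i]] + links[:i] + links[i+1:]), with no mutable state.
import Mathlib
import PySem

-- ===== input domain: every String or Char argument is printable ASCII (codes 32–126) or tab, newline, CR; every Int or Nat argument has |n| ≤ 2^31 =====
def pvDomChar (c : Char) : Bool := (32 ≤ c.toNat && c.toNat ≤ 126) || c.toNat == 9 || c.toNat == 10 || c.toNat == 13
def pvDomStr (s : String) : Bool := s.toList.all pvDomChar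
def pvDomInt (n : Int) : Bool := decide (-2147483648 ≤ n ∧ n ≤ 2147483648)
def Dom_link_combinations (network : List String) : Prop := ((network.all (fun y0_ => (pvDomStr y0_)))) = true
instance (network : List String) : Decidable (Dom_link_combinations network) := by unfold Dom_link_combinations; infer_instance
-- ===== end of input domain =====

set_option maxHeartbeats 800000


-- B replaces the cumulative in-place swap generator by building each permutation directly with
-- slices (rotate element i to the front); objective: simpler, no mutation of the list.

-- hand port of s.replace(old, new, 1) on List Char (PySem has only the unbounded replace);
-- exact for nonempty `old`, which is how both programs call it (old = "\t")
def replaceOnceChars (old new : List Char) : List Char → List Char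
  | [] => []
  | c :: rest =>
    if old.isPrefixOf (c :: rest) then new ++ (c :: rest).drop old.length
    else c :: replaceOnceChars old new rest

def replaceOnce (s old new : String) : String :=
  String.ofList (replaceOnceChars old.toList new.toList s.toList)

-- ===== PORT A =====
-- one iteration of combs' loop: swap links[0] and links[i] in place, yield the joined line
def combsStep (st : List String × List String) (i : Int) : List String × List String :=
  let a := PySem.List.pyGetD st.1 0 ""
  let b := PySem.List.pyGetD st.1 i ""
  let l' := PySem.List.pySetD (PySem.List.pySetD st.1 0 b) i a
  (l', st.2 ++ [PySem.Str.join "\t" l'])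

-- combs(links, n): the call combs(links) passes n0 = 0 (0 and None are both falsy, so `n or len(links)` agrees)
def combsA (links : List String) (n0 : Int) : List String :=
  ((PySem.List.pyRange 1 (if n0 = 0 then (links.length : Int) else n0) 1).foldl
    combsStep (links, [])).2

def link_combinations (network : List String) : List String :=
  network.foldl
    (fun acc raw =>
      let line := PySem.Str.strip raw
      let links := (PySem.Str.split? line "\t").getD []
      if "#" ∈ links then
        let n : Int := ((PySem.List.index? links "#").getD 0 : Nat)
        let links' := (PySem.List.remove? links "#").getD links
        acc ++ [line] ++ (combsA links' n).map (fun c => replaceOnce c "\t" "\t#\t")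
      else
        acc ++ [line] ++ combsA links 0)
    []

-- ===== PORT B =====
-- [links[i]] + links[:i] + links[i+1:]
def rotB (links : List String) (i : Int) : List String :=
  PySem.List.pyGetD links i "" ::
    (PySem.List.slice links none (some i) ++ PySem.List.slice links (some (i + 1)) none)

def link_combinations_alt (network : List String) : List String :=
  network.foldl
    (fun acc raw =>
      let line := PySem.Str.strip raw
      let links := (PySem.Str.split? line "\t").getD []
      if "#" ∈ links then
        let k : Nat := (PySem.List.index? links "#").getD 0
        let rest := PySem.List.slice links none (some (k : Int)) ++
                    PySem.List.slice links (some ((k : Int) + 1)) none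
        let m : Int := if k = 0 then (rest.length : Int) else (k : Int)
        acc ++ [line] ++ (PySem.List.pyRange 1 m 1).map
          (fun i => replaceOnce (PySem.Str.join "\t" (rotB rest i)) "\t" "\t#\t")
      else
        acc ++ [line] ++ (PySem.List.pyRange 1 (links.length : Int) 1).map
          (fun i => PySem.Str.join "\t" (rotB links i)))
    []

-- ===== PRECONDITION & SPEC =====
def Spec_link_combinations (network : List String) (out : List String) : Prop := out = link_combinations_alt network
instance (network : List String) (out : List String) : Decidable (Spec_link_combinations network out) := by unfold Spec_link_combinations; infer_instance

-- ===== CLAIM (what is proved, stated in full; the proofs are below) =====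
def Claim_equal_link_combinations : Prop := ∀ (network : List String), Dom_link_combinations network → Spec_link_combinations network (link_combinations network)

-- ===== LEMMAS AND PROOFS =====

-- the list held by A's swap loop after processing indices 1..j: element j first, then the rest in order
def rotN (l : List String) (j : Nat) : List String :=
  l.getD j "" :: (l.take j ++ l.drop (j + 1))

theorem rotN_zero (l : List String) (h : l ≠ []) : rotN l 0 = l := by
  cases l with
  | nil => exact absurd rfl h
  | cons x t => simp [rotN]

theorem pyGetD_zero (m : List String) (d : String) :
    PySem.List.pyGetD m 0 d = m.getD 0 d := by
  apply PySem.List.pyGetD_natCast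

theorem pySetD_zero (m : List String) (v : String) :
    PySem.List.pySetD m 0 v = m.set 0 v := by
  apply PySem.List.pySetD_natCast

theorem rotB_eq_rotN (l : List String) (i : Int) (h : 0 ≤ i) :
    rotB l i = rotN l i.toNat := by
  unfold rotB rotN
  rw [PySem.List.pyGetD_of_nonneg _ _ h, PySem.List.slice_to l h,
    PySem.List.slice_from l (by omega : (0:Int) ≤ i + 1),
    show (i + 1).toNat = i.toNat + 1 by omega]

-- one swap step advances the rotation
theorem step_rot (l : List String) (j : Nat) (acc : List String) (h : j + 1 < l.length) :
    combsStep (rotN l j, acc) ((j : Int) + 1)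
      = (rotN l (j + 1), acc ++ [PySem.Str.join "\t" (rotN l (j + 1))]) := by
  have hjl : j < l.length := by omega
  have hlt : (l.take j).length = j := by simp [Nat.min_eq_left hjl.le]
  have hget : (rotN l j).getD (j + 1) "" = l.getD (j + 1) "" := by
    simp only [rotN, List.getD, List.getElem?_cons_succ]
    rw [List.getElem?_append_right (by rw [hlt])]
    rw [hlt]
    simp [List.getElem?_drop]
  have hzero : (rotN l j).getD 0 "" = l.getD j "" := by simp [rotN]
  have hset : ((rotN l j).set 0 (l.getD (j + 1) "")).set (j + 1) (l.getD j "")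
      = rotN l (j + 1) := by
    have hd : l.drop (j + 1) = l[j + 1] :: l.drop (j + 2) := List.drop_eq_getElem_cons h
    have htk : l.take (j + 1) = l.take j ++ [l[j]] := by
      rw [List.take_succ]
      simp [List.getElem?_eq_getElem hjl]
    simp only [rotN, List.set_cons_zero, List.set_cons_succ]
    rw [List.set_append_right _ _ (by rw [hlt])]
    rw [hlt, Nat.sub_self, hd, List.set_cons_zero, htk]
    simp only [List.getD, List.getElem?_eq_getElem h, List.getElem?_eq_getElem hjl,
      Option.getD_some, List.append_assoc, List.singleton_append]
  have hc : ((j : Int) + 1) = ((j + 1 : Nat) : Int) := by push_cast; ring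
  rw [hc]
  simp only [combsStep, pyGetD_zero, pySetD_zero, PySem.List.pyGetD_natCast,
    PySem.List.pySetD_natCast]
  rw [hget, hzero, hset]

-- the swap loop, run from index j over c steps, yields the rotations j..j+c-1
theorem foldLoop (l : List String) (c : Nat) : ∀ (j : Nat) (acc : List String),
    1 ≤ j → j + c ≤ l.length →
    (PySem.List.pyRange (j : Int) ((j : Int) + (c : Int)) 1).foldl combsStep (rotN l (j - 1), acc)
      = (rotN l (j + c - 1),
          acc ++ (PySem.List.pyRange (j : Int) ((j : Int) + (c : Int)) 1).map
            (fun i => PySem.Str.join "\t" (rotN l i.toNat))) := by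
  induction c with
  | zero =>
    intro j acc hj hlen
    rw [PySem.List.pyRange_one_eq_nil (by omega)]
    simp
  | succ c ih =>
    intro j acc hj hlen
    rw [PySem.List.pyRange_one_cons (by omega : (j : Int) < (j : Int) + ((c + 1 : Nat) : Int))]
    have hstep : combsStep (rotN l (j - 1), acc) ((j : Int))
        = (rotN l j, acc ++ [PySem.Str.join "\t" (rotN l j)]) := by
      have h0 := step_rot l (j - 1) acc (by omega)
      have hc1 : ((j - 1 : Nat) : Int) + 1 = (j : Int) := by omega
      have hc2 : j - 1 + 1 = j := by omega
      rw [hc1, hc2] at h0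
      exact h0
    simp only [List.foldl_cons, hstep]
    have harith : (j : Int) + 1 = ((j + 1 : Nat) : Int) := by push_cast; ring
    have harith2 : (j : Int) + ((c + 1 : Nat) : Int) = ((j + 1 : Nat) : Int) + (c : Nat) := by
      push_cast; ring
    have hrw : rotN l j = rotN l (j + 1 - 1) := by norm_num
    rw [harith, harith2, hrw, ih (j + 1) _ (by omega) (by omega)]
    have e1 : j + 1 + c - 1 = j + (c + 1) - 1 := by omega
    have e2 : j + 1 - 1 = j := by omega
    rw [e1, e2]
    simp [List.append_assoc]

theorem combsA_eq_map (links : List String) (n0 : Int)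
    (h : (if n0 = 0 then (links.length : Int) else n0) ≤ (links.length : Int)) :
    combsA links n0 =
      (PySem.List.pyRange 1 (if n0 = 0 then (links.length : Int) else n0) 1).map
        (fun i => PySem.Str.join "\t" (rotB links i)) := by
  unfold combsA
  set N : Int := if n0 = 0 then (links.length : Int) else n0 with hN
  by_cases hle : N ≤ 1
  · rw [PySem.List.pyRange_one_eq_nil hle]
    simp
  · push_neg at hle
    have hlen : 2 ≤ links.length := by omega
    have hne : links ≠ [] := by intro hnil; rw [hnil] at hlen; simp at hlen
    set c : Nat := (N - 1).toNat with hc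
    have h2 : N = ((1 : Nat) : Int) + (c : Int) := by omega
    rw [h2]
    have hfold := foldLoop links c 1 [] (le_refl 1) (by omega)
    rw [show (1 : Nat) - 1 = 0 from rfl, rotN_zero links hne] at hfold
    rw [show ((1 : Nat) : Int) = (1 : Int) from rfl] at hfold ⊢
    rw [hfold]
    simp only [List.nil_append]
    apply List.map_congr_left
    intro i hi
    rw [PySem.List.mem_pyRange_one] at hi
    rw [rotB_eq_rotN links i (by omega)]

-- per-line agreement of the two loop bodies (line and links generalized)
theorem branch_eq (acc : List String) (line : String) (links : List String) :
    (if "#" ∈ links then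
       acc ++ [line] ++ (combsA ((PySem.List.remove? links "#").getD links)
           (((PySem.List.index? links "#").getD 0 : Nat) : Int)).map
         (fun c => replaceOnce c "\t" "\t#\t")
     else
       acc ++ [line] ++ combsA links 0)
    =
    (if "#" ∈ links then
       acc ++ [line] ++ (PySem.List.pyRange 1
           (if ((PySem.List.index? links "#").getD 0 : Nat) = 0 then
             (((PySem.List.slice links none (some (((PySem.List.index? links "#").getD 0 : Nat) : Int)) ++
                PySem.List.slice links (some ((((PySem.List.index? links "#").getD 0 : Nat) : Int) + 1)) none).length : Int))
            else (((PySem.List.index? links "#").getD 0 : Nat) : Int)) 1).map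
         (fun i => replaceOnce (PySem.Str.join "\t"
             (rotB (PySem.List.slice links none (some (((PySem.List.index? links "#").getD 0 : Nat) : Int)) ++
                    PySem.List.slice links (some ((((PySem.List.index? links "#").getD 0 : Nat) : Int) + 1)) none) i)) "\t" "\t#\t")
     else
       acc ++ [line] ++ (PySem.List.pyRange 1 (links.length : Int) 1).map
         (fun i => PySem.Str.join "\t" (rotB links i))) := by
  by_cases hmem : "#" ∈ links
  · rw [if_pos hmem, if_pos hmem]
    obtain ⟨k, hk⟩ : ∃ k, PySem.List.index? links "#" = some k :=
      Option.isSome_iff_exists.mp ((PySem.List.index?_isSome_iff links "#").mpr hmem)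
    obtain ⟨pre, suf, hdecomp, hpre, hnotin⟩ := (PySem.List.index?_eq_some_iff _ _ _).mp hk
    rw [hk]
    simp only [Option.getD_some]
    have hrm : (PySem.List.remove? links "#").getD links = pre ++ suf := by
      rw [PySem.List.remove?_eq_some_erase _ _ hmem, Option.getD_some, hdecomp,
        List.erase_append_right _ hnotin, List.erase_cons_head]
    have htake : PySem.List.slice links none (some ((k : Nat) : Int)) = pre := by
      rw [PySem.List.slice_to_natCast, hdecomp,
        List.take_append_of_le_length (le_of_eq hpre.symm), ← hpre, List.take_length]
    have hdrop : PySem.List.slice links (some (((k : Nat) : Int) + 1)) none = suf := by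
      rw [show ((k : Nat) : Int) + 1 = ((k + 1 : Nat) : Int) by push_cast; ring,
        PySem.List.slice_from_natCast, hdecomp,
        show pre ++ "#" :: suf = (pre ++ ["#"]) ++ suf by simp,
        List.drop_append_of_le_length (by simp [hpre])]
      simp [hpre]
    rw [hrm, htake, hdrop]
    rw [combsA_eq_map (pre ++ suf) (k : Int) (by
      by_cases h0 : k = 0
      · simp [h0]
      · rw [if_neg (by omega : ¬ ((k : Int) = 0))]
        have : k ≤ (pre ++ suf).length := by
          simp only [List.length_append]
          omega
        omega)]
    rw [show (if ((k : Nat) : Int) = 0 then (((pre ++ suf) : List String).length : Int) else ((k : Nat) : Int))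
        = (if k = 0 then (((pre ++ suf) : List String).length : Int) else ((k : Nat) : Int)) by
      by_cases h0 : k = 0 <;> simp [h0]]
    rw [List.map_map]
    simp [Function.comp]
  · rw [if_neg hmem, if_neg hmem]
    rw [combsA_eq_map links 0 (by simp)]
    simp

theorem foldl_ext {α β : Type} (f g : β → α → β) (h : ∀ b a, f b a = g b a) :
    ∀ (l : List α) (b : β), l.foldl f b = l.foldl g b := by
  intro l
  induction l with
  | nil => intro b; rfl
  | cons x xs ih => intro b; simp only [List.foldl_cons, h]; exact ih _

-- ===== VERDICT =====
theorem link_combinations_spec : Claim_equal_link_combinations := by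
  intro network _
  show link_combinations network = link_combinations_alt network
  unfold link_combinations link_combinations_alt
  exact foldl_ext _ _
    (fun acc raw => branch_eq acc (PySem.Str.strip raw)
      ((PySem.Str.split? (PySem.Str.strip raw) "\t").getD [])) network []
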